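-- pv_equiv track=rewrite | github.com/Eason6wang/Longest-time-block | block.py | longest_time
-- ===== SOURCE A (Python) =====
-- def longest_time(time_list):
--     longest = ()
--     delta1 = 0
--     for time in time_list:
--         delta2 = time[1] - time[0]
--         if(delta1 < delta2):
--             longest = time
--             delta1 = longest[1] - longest[0]
--     lst_longest = []
--     # find the interval has the same length
--     for time in time_list:
--         delta2 = time[1] - time[0]
--         if(delta1 == delta2):
--             lst_longest.append(time)
--     return lst_longest
-- ===== SOURCE B (Python) =====
-- def longest_time(time_list):
--     best = 0
--     result = []
--     for time in time_list:
--         d = time[1] - time[0]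
--         if d > best:
--             best = d
--             result = [time]
--         elif d == best:
--             result.append(time)
--     return result
-- ===== Notes on version B (the rewrite author's own statement) =====
-- stated objective: simpler
-- what changed: Single pass maintaining (best, result) with reset-on-new-max / append-on-tie, replacing A's two passes (max-finding pass then filtering pass).
import Mathlib
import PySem

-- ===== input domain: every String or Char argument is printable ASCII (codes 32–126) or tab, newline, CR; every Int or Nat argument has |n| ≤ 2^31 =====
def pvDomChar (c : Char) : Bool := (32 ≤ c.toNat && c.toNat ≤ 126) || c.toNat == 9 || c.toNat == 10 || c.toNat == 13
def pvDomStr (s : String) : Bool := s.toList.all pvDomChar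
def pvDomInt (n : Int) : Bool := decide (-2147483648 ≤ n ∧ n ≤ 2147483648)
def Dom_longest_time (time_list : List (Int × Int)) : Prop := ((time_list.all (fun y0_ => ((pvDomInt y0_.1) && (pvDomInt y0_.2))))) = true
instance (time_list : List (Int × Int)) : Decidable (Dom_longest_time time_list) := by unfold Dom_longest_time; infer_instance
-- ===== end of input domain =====

-- One-pass re-implementation: B keeps (best, result) and resets/appends per element,
-- replacing A's two passes (max pass then filter pass); objective: simpler.


-- ===== PORT A =====
-- first loop: state (longest?, delta1); 'longest = ()' is never returned, modelled as Option
def longest_time (time_list : List (Int × Int)) : List (Int × Int) :=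
  let st := time_list.foldl
    (fun (s : Option (Int × Int) × Int) time =>
      let delta2 := time.2 - time.1
      if s.2 < delta2 then
        let longest := time
        (some longest, longest.2 - longest.1)
      else s)
    (none, 0)
  let delta1 := st.2
  time_list.foldl
    (fun (lst_longest : List (Int × Int)) time =>
      let delta2 := time.2 - time.1
      if delta1 == delta2 then lst_longest ++ [time] else lst_longest)
    []

-- ===== PORT B =====
def longest_time_alt (time_list : List (Int × Int)) : List (Int × Int) :=
  (time_list.foldl
    (fun (s : Int × List (Int × Int)) time =>
      let d := time.2 - time.1
      if d > s.1 then (d, [time])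
      else if d == s.1 then (s.1, s.2 ++ [time])
      else s)
    (0, [])).2

-- ===== PRECONDITION & SPEC =====
def Spec_longest_time (time_list : List (Int × Int)) (out : List (Int × Int)) : Prop := out = longest_time_alt time_list
instance (time_list : List (Int × Int)) (out : List (Int × Int)) : Decidable (Spec_longest_time time_list out) := by unfold Spec_longest_time; infer_instance

-- ===== CLAIM (what is proved, stated in full; the proofs are below) =====
def Claim_equal_longest_time : Prop := ∀ (time_list : List (Int × Int)), Dom_longest_time time_list → Spec_longest_time time_list (longest_time time_list)

-- ===== LEMMAS AND PROOFS =====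

-- the max of deltas, floored at b
def pvMaxD (l : List (Int × Int)) (b : Int) : Int :=
  l.foldl (fun a t => max a (t.2 - t.1)) b

theorem pvMaxD_le (l : List (Int × Int)) (b : Int) : b ≤ pvMaxD l b := by
  induction l generalizing b with
  | nil => simp [pvMaxD]
  | cons t l ih =>
    have h := ih (max b (t.2 - t.1))
    have : b ≤ max b (t.2 - t.1) := le_max_left _ _
    simp only [pvMaxD, List.foldl] at *
    omega

-- A's first-loop delta component equals pvMaxD
theorem pvA1_snd (l : List (Int × Int)) (s : Option (Int × Int) × Int) :
    (l.foldl
      (fun (s : Option (Int × Int) × Int) time =>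
        let delta2 := time.2 - time.1
        if s.2 < delta2 then
          let longest := time
          (some longest, longest.2 - longest.1)
        else s) s).2 = pvMaxD l s.2 := by
  induction l generalizing s with
  | nil => simp [pvMaxD]
  | cons t l ih =>
    simp only [List.foldl, pvMaxD] at *
    by_cases h : s.2 < t.2 - t.1
    · simp [h, ih, max_eq_right (le_of_lt h)]
    · simp [h, ih, max_eq_left (le_of_not_gt h)]

-- B's fold characterised: result component is (kept prefix) ++ filter on the final max
theorem pvB_fold (l : List (Int × Int)) (b : Int) (r : List (Int × Int)) :
    l.foldl
      (fun (s : Int × List (Int × Int)) time =>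
        let d := time.2 - time.1
        if d > s.1 then (d, [time])
        else if d == s.1 then (s.1, s.2 ++ [time])
        else s) (b, r)
    = (pvMaxD l b,
       (if b = pvMaxD l b then r else []) ++ l.filter (fun t => t.2 - t.1 == pvMaxD l b)) := by
  induction l generalizing b r with
  | nil => simp [pvMaxD]
  | cons t l ih =>
    have hcons : pvMaxD (t :: l) b = pvMaxD l (max b (t.2 - t.1)) := by
      simp [pvMaxD, List.foldl]
    simp only [List.foldl]
    by_cases h1 : t.2 - t.1 > b
    · have hmax : max b (t.2 - t.1) = t.2 - t.1 := max_eq_right (le_of_lt h1)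
      have hle : t.2 - t.1 ≤ pvMaxD l (t.2 - t.1) := pvMaxD_le _ _
      rw [if_pos h1, ih (t.2 - t.1) [t], hcons, hmax, List.filter_cons]
      rw [if_neg (show ¬ b = pvMaxD l (t.2 - t.1) by omega)]
      by_cases h2 : t.2 - t.1 = pvMaxD l (t.2 - t.1)
      · rw [if_pos h2, if_pos (show ((t.2 - t.1 == pvMaxD l (t.2 - t.1)) = true) by
          simp only [beq_iff_eq]; omega)]
        simp
      · rw [if_neg h2, if_neg (show ¬ ((t.2 - t.1 == pvMaxD l (t.2 - t.1)) = true) by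
          simp only [beq_iff_eq]; omega)]
    · have hmax : max b (t.2 - t.1) = b := max_eq_left (le_of_not_gt h1)
      have hle : b ≤ pvMaxD l b := pvMaxD_le l b
      rw [if_neg h1, hcons, hmax]
      by_cases h2 : t.2 - t.1 = b
      · rw [if_pos (show ((t.2 - t.1 == b) = true) by simp only [beq_iff_eq]; omega),
            ih b (r ++ [t]), List.filter_cons]
        by_cases h3 : b = pvMaxD l b
        · rw [if_pos h3, if_pos h3, if_pos (show ((t.2 - t.1 == pvMaxD l b) = true) by
            simp only [beq_iff_eq]; omega)]
          simp
        · rw [if_neg h3, if_neg h3, if_neg (show ¬ ((t.2 - t.1 == pvMaxD l b) = true) by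
            simp only [beq_iff_eq]; omega)]
      · rw [if_neg (show ¬ ((t.2 - t.1 == b) = true) by simp only [beq_iff_eq]; omega),
            ih b r, List.filter_cons]
        have hlt : t.2 - t.1 < b := lt_of_le_of_ne (le_of_not_gt h1) h2
        rw [if_neg (show ¬ ((t.2 - t.1 == pvMaxD l b) = true) by
          simp only [beq_iff_eq]; omega)]

theorem pvA_eq_filter (l : List (Int × Int)) :
    longest_time l = l.filter (fun t => t.2 - t.1 == pvMaxD l 0) := by
  have h2 : l.foldl
      (fun (acc : List (Int × Int)) time =>
        if (pvMaxD l 0 == time.2 - time.1) then acc ++ [time] else acc) []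
      = l.filter (fun t => t.2 - t.1 == pvMaxD l 0) := by
    refine (PySem.List.foldl_append_if_eq_filter
      (fun time : Int × Int => pvMaxD l 0 == time.2 - time.1) l []).trans ?_
    rw [List.nil_append]
    refine List.filter_congr (fun x _ => ?_)
    by_cases h : pvMaxD l 0 = x.2 - x.1
    · simp [h]
    · simp [h, Ne.symm h]
  calc longest_time l
      = l.foldl
          (fun (acc : List (Int × Int)) time =>
            if (pvMaxD l 0 == time.2 - time.1) then acc ++ [time] else acc) [] := by
        show (l.foldl
          (fun (lst_longest : List (Int × Int)) time =>
            let delta2 := time.2 - time.1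
            if ((l.foldl
              (fun (s : Option (Int × Int) × Int) time =>
                let delta2 := time.2 - time.1
                if s.2 < delta2 then
                  let longest := time
                  (some longest, longest.2 - longest.1)
                else s) ((none : Option (Int × Int)), (0 : Int))).2 == delta2)
            then lst_longest ++ [time] else lst_longest)
          []) = _
        rw [pvA1_snd l ((none : Option (Int × Int)), (0 : Int))]
    _ = l.filter (fun t => t.2 - t.1 == pvMaxD l 0) := h2

theorem pvB_eq_filter (l : List (Int × Int)) :
    longest_time_alt l = l.filter (fun t => t.2 - t.1 == pvMaxD l 0) := by
  show (l.foldl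
      (fun (s : Int × List (Int × Int)) time =>
        let d := time.2 - time.1
        if d > s.1 then (d, [time])
        else if d == s.1 then (s.1, s.2 ++ [time])
        else s) (0, [])).2 = _
  rw [pvB_fold]
  split_ifs <;> simp

-- ===== VERDICT (by name: the statement is the Claim_ definition above) =====
theorem longest_time_spec : Claim_equal_longest_time := by
  intro l _
  unfold Spec_longest_time
  rw [pvA_eq_filter, pvB_eq_filter]
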